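-- pv_equiv track=rewrite | github.com/bgaosec/oceanwiki | convert_dump.py | _choose_caption
-- ===== SOURCE A (Python) =====
-- from typing import Dict, Iterable, List, Optional, Set
--
-- ATTACHMENT_OPTION_PREFIXES = (
--     "thumb",
--     "thumbnail",
--     "frame",
--     "frameless",
--     "border",
--     "right",
--     "left",
--     "center",
--     "none",
-- )
--
-- def _choose_caption(options: Iterable[str]) -> str:
--     for option in reversed([opt for opt in options if opt]):
--         lower = option.lower()
--         if any(lower.startswith(prefix) for prefix in ATTACHMENT_OPTION_PREFIXES):
--             continue
--         if lower.startswith("alt="):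
--             return option.split("=", 1)[1]
--         if lower.startswith("link=") or lower.startswith("page="):
--             continue
--         return option
--     return ""
-- ===== SOURCE B (Python) =====
-- ATTACHMENT_OPTION_PREFIXES = (
--     "thumb",
--     "thumbnail",
--     "frame",
--     "frameless",
--     "border",
--     "right",
--     "left",
--     "center",
--     "none",
-- )
--
-- def _choose_caption(options):
--     result = ""
--     for option in options:
--         if not option:
--             continue
--         lower = option.lower()
--         if any(lower.startswith(prefix) for prefix in ATTACHMENT_OPTION_PREFIXES):
--             continue
--         if lower.startswith("alt="):
--             result = option.split("=", 1)[1]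
--         elif lower.startswith("link=") or lower.startswith("page="):
--             continue
--         else:
--             result = option
--     return result
-- ===== Notes on version B (the rewrite author's own statement) =====
-- stated objective: simpler
-- what changed: Single forward pass keeping the last qualifying caption in an accumulator, instead of materialising the filtered list, reversing it and early-returning on the first match.
import Mathlib
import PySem

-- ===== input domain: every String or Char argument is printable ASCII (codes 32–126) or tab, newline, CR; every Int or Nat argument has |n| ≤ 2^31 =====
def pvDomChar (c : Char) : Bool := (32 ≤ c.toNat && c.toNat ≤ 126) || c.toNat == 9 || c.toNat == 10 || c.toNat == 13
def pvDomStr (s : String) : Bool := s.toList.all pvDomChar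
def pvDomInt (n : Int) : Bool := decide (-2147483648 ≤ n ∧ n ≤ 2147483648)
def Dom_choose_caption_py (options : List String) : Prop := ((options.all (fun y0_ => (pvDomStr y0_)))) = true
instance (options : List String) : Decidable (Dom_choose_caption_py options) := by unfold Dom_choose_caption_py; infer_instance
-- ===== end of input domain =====

-- B replaces A's filter + reverse + first-match early return by a single forward pass that keeps the last qualifying option in an accumulator (objective: simpler).

-- ===== PORT A =====
-- module constant ATTACHMENT_OPTION_PREFIXES
def pvPrefixes : List String :=
  ["thumb", "thumbnail", "frame", "frameless", "border", "right", "left", "center", "none"]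

-- option.split("=", 1)[1]; both Pythons use this very expression, only under 'lower.startswith("alt=")',
-- where the "=" is present, so the [1] index (here .getD 1 "") never falls back
def pvAltVal (o : String) : String :=
  ((PySem.Str.splitMax? o "=" 1).getD []).getD 1 ""

-- the 'for option in …: / continue / return / return ""' loop of A
def pvLoopA : List String → String
  | [] => ""
  | o :: rest =>
    let lower := PySem.Str.lower o
    if pvPrefixes.any (fun p => PySem.Str.startswith lower p) then pvLoopA rest
    else if PySem.Str.startswith lower "alt=" then pvAltVal o
    else if PySem.Str.startswith lower "link=" || PySem.Str.startswith lower "page=" then pvLoopA rest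
    else o

def choose_caption_py (options : List String) : String :=
  pvLoopA (options.filter (fun o => o != "")).reverse

-- ===== PORT B =====
def choose_caption_py_alt (options : List String) : String :=
  options.foldl
    (fun result option =>
      if option == "" then result
      else
        let lower := PySem.Str.lower option
        if pvPrefixes.any (fun p => PySem.Str.startswith lower p) then result
        else if PySem.Str.startswith lower "alt=" then pvAltVal option
        else if PySem.Str.startswith lower "link=" || PySem.Str.startswith lower "page=" then result
        else option)
    ""

-- ===== PRECONDITION & SPEC =====
def Spec_choose_caption_py (options : List String) (out : String) : Prop := out = choose_caption_py_alt options
instance (options : List String) (out : String) : Decidable (Spec_choose_caption_py options out) := by unfold Spec_choose_caption_py; infer_instance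

-- ===== CLAIM (what is proved, stated in full; the proofs are below) =====
def Claim_equal_choose_caption_py : Prop := ∀ (options : List String), Dom_choose_caption_py options → Spec_choose_caption_py options (choose_caption_py options)

-- ===== LEMMAS AND PROOFS =====

-- classification of one option: none = skipped by both programs, some v = caption candidate v
def pvHit (o : String) : Option String :=
  if o = "" then none
  else
    let lower := PySem.Str.lower o
    if pvPrefixes.any (fun p => PySem.Str.startswith lower p) then none
    else if PySem.Str.startswith lower "alt=" then some (pvAltVal o)
    else if PySem.Str.startswith lower "link=" || PySem.Str.startswith lower "page=" then none
    else some o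

-- first hit in a list
def pvF : List String → Option String
  | [] => none
  | o :: t => match pvHit o with
    | some v => some v
    | none => pvF t

theorem pvF_append (xs ys : List String) :
    pvF (xs ++ ys) = match pvF xs with | some v => some v | none => pvF ys := by
  induction xs with
  | nil => simp [pvF]
  | cons o t ih =>
    simp only [List.cons_append, pvF]
    cases pvHit o <;> simp [ih]

theorem pvLoopA_filter (l : List String) :
    pvLoopA (l.filter (fun o => o != "")) = (pvF l).getD "" := by
  induction l with
  | nil => rfl
  | cons o t ih =>
    by_cases ho : o = ""
    · simp [ho, pvF, pvHit, ih]
    · have hne : (o != "") = true := by simp [ho]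
      simp only [List.filter_cons, hne, if_pos]
      simp only [pvLoopA, pvF, pvHit, if_neg ho]
      split_ifs <;> simp [ih]

theorem pvLoopB (l : List String) (acc : String) :
    l.foldl
      (fun result option =>
        if option == "" then result
        else
          let lower := PySem.Str.lower option
          if pvPrefixes.any (fun p => PySem.Str.startswith lower p) then result
          else if PySem.Str.startswith lower "alt=" then pvAltVal option
          else if PySem.Str.startswith lower "link=" || PySem.Str.startswith lower "page=" then result
          else option)
      acc = (pvF l.reverse).getD acc := by
  induction l generalizing acc with
  | nil => rfl
  | cons o t ih =>
    simp only [List.foldl_cons, List.reverse_cons, pvF_append, ih]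
    have hstep : (if o == "" then acc
        else
          let lower := PySem.Str.lower o
          if pvPrefixes.any (fun p => PySem.Str.startswith lower p) then acc
          else if PySem.Str.startswith lower "alt=" then pvAltVal o
          else if PySem.Str.startswith lower "link=" || PySem.Str.startswith lower "page=" then acc
          else o) = (pvHit o).getD acc := by
      simp only [pvHit, beq_iff_eq]
      split_ifs <;> rfl
    rw [hstep]
    cases pvF t.reverse <;> cases h : pvHit o <;> simp [pvF, h]

-- ===== VERDICT (by name: the statement is the Claim_ definition above) =====
theorem choose_caption_py_spec : Claim_equal_choose_caption_py := by
  intro options _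
  show choose_caption_py options = choose_caption_py_alt options
  rw [choose_caption_py, choose_caption_py_alt, pvLoopB, ← List.filter_reverse, pvLoopA_filter]
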